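-- pv_equiv track=rewrite | github.com/jmshoun/braintree | braintree/tree.py | _split_trees
-- ===== SOURCE A (Python) =====
-- def _split_trees(tree_lines):
--     """Splits a list of text lines from a tree dump into separate trees."""
--     trees = []
--     current_tree = []
--     for line in tree_lines[1:]:
--         if line.find("booster") == 0:
--             trees += [current_tree]
--             current_tree = []
--         else:
--             current_tree += [line]
--     trees += [current_tree]
--     return trees
-- ===== SOURCE B (Python) =====
-- def _split_trees(tree_lines):
--     """Splits a list of text lines from a tree dump into separate trees."""
--     body = tree_lines[1:]
--     markers = [i for i, line in enumerate(body) if line.startswith("booster")]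
--     starts = [0] + [m + 1 for m in markers]
--     ends = markers + [len(body)]
--     return [body[s:e] for s, e in zip(starts, ends)]
-- ===== Notes on version B (the rewrite author's own statement) =====
-- stated objective: alternative
-- what changed: Instead of streaming with a current-group accumulator, B first collects the boundary indices of all 'booster' marker lines and then materialises each tree by slicing between consecutive boundaries.
import Mathlib
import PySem

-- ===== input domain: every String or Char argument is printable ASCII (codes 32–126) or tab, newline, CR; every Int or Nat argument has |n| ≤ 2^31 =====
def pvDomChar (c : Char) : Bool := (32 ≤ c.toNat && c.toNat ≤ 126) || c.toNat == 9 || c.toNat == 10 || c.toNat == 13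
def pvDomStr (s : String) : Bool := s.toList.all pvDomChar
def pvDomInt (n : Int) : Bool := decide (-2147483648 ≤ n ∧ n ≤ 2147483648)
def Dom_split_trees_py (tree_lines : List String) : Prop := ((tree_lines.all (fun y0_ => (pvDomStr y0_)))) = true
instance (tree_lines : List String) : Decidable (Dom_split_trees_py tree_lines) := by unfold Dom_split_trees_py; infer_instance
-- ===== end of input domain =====

-- B replaces A's streaming accumulator with a find-boundaries pass plus a slicing pass (alternative decomposition, same O(n) cost).

-- ===== PORT A =====
def split_trees_py (tree_lines : List String) : List (List String) :=
  -- trees = []; current_tree = []; for line in tree_lines[1:]: ...; trees += [current_tree]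
  let st := (PySem.List.slice tree_lines (some 1) none).foldl
    (fun (st : List (List String) × List String) line =>
      if PySem.Str.find line "booster" == 0 then (st.1 ++ [st.2], [])
      else (st.1, st.2 ++ [line]))
    ([], [])
  st.1 ++ [st.2]

-- ===== PORT B =====
def split_trees_py_alt (tree_lines : List String) : List (List String) :=
  let body := PySem.List.slice tree_lines (some 1) none
  let markers := ((PySem.List.enumerate body).filter
      (fun p => PySem.Str.startswith p.2 "booster")).map (·.1)
  let starts := (0 : Int) :: markers.map (· + 1)
  let ends := markers ++ [(body.length : Int)]
  (starts.zip ends).map (fun p => PySem.List.slice body (some p.1) (some p.2))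

-- ===== PRECONDITION & SPEC =====
def Spec_split_trees_py (tree_lines : List String) (out : List (List String)) : Prop := out = split_trees_py_alt tree_lines
instance (tree_lines : List String) (out : List (List String)) : Decidable (Spec_split_trees_py tree_lines out) := by unfold Spec_split_trees_py; infer_instance

-- ===== CLAIM (what is proved, stated in full; the proofs are below) =====
def Claim_equal_split_trees_py : Prop := ∀ (tree_lines : List String), Dom_split_trees_py tree_lines → Spec_split_trees_py tree_lines (split_trees_py tree_lines)

-- ===== LEMMAS AND PROOFS =====

-- canonical recursive splitter both ports are proved equal to
def splitRec : List String → List (List String)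
  | [] => [[]]
  | x :: xs =>
    if PySem.Str.startswith x "booster" then [] :: splitRec xs
    else (splitRec xs).modifyHead (x :: ·)

-- Nat-level marker indices
def natMarkers : List String → List Nat
  | [] => []
  | x :: xs =>
    if PySem.Str.startswith x "booster" then 0 :: (natMarkers xs).map (· + 1)
    else (natMarkers xs).map (· + 1)

lemma splitRec_ne_nil : ∀ (l : List String), splitRec l ≠ [] := by
  intro l
  induction l with
  | nil => simp [splitRec]
  | cons x xs ih =>
    unfold splitRec
    obtain ⟨a, t, h⟩ : ∃ a t, splitRec xs = a :: t := by
      cases hS : splitRec xs with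
      | nil => exact absurd hS ih
      | cons a t => exact ⟨a, t, rfl⟩
    rw [h]
    split <;> simp [List.modifyHead]

lemma splitRec_cons_form (l : List String) : ∃ a t, splitRec l = a :: t := by
  cases hS : splitRec l with
  | nil => exact absurd hS (splitRec_ne_nil l)
  | cons a t => exact ⟨a, t, rfl⟩

lemma find_beq_zero_eq_startswith (s : String) :
    (PySem.Str.find s "booster" == 0) = PySem.Str.startswith s "booster" := by
  simp only [PySem.Str.find_eq, PySem.Str.startswith_eq]
  by_cases h : ("booster".toList) <+: s.toList
  · have hnn : 0 ≤ PySem.Chars.find s.toList "booster".toList :=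
      (PySem.Chars.find_nonneg_iff _ _).mpr h.isInfix
    have hspec := PySem.Chars.find_spec hnn
    have h0 : PySem.Chars.find s.toList "booster".toList = 0 := by
      by_contra hne
      have hpos : 0 < (PySem.Chars.find s.toList "booster".toList).toNat := by omega
      exact hspec.2 0 hpos (by simpa using h)
    have hsw : PySem.Chars.startswith s.toList "booster".toList = true :=
      (PySem.Chars.startswith_iff _ _).mpr h
    rw [h0, hsw]; rfl
  · have hsw : PySem.Chars.startswith s.toList "booster".toList = false := by
      by_contra hb
      exact h ((PySem.Chars.startswith_iff _ _).mp (by simpa using hb))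
    rw [hsw]
    have hz : PySem.Chars.find s.toList "booster".toList ≠ 0 := by
      intro hz
      have hspec := PySem.Chars.find_spec (le_of_eq hz.symm)
      rw [hz] at hspec
      exact h (by simpa using hspec.1)
    exact beq_eq_false_iff_ne.mpr hz

-- ===== A side =====

lemma A_loop (l : List String) : ∀ (trees : List (List String)) (cur : List String),
    (List.foldl
        (fun (st : List (List String) × List String) line =>
          if PySem.Str.find line "booster" == 0 then (st.1 ++ [st.2], [])
          else (st.1, st.2 ++ [line])) (trees, cur) l).1
      ++ [(List.foldl
        (fun (st : List (List String) × List String) line =>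
          if PySem.Str.find line "booster" == 0 then (st.1 ++ [st.2], [])
          else (st.1, st.2 ++ [line])) (trees, cur) l).2]
      = trees ++ (splitRec l).modifyHead (cur ++ ·) := by
  induction l with
  | nil => intro trees cur; simp [splitRec]
  | cons x xs ih =>
    intro trees cur
    simp only [List.foldl_cons, splitRec]
    rw [find_beq_zero_eq_startswith x]
    by_cases hx : PySem.Str.startswith x "booster"
    · simp only [hx, if_true]
      rw [ih]
      obtain ⟨a, t, hE⟩ := splitRec_cons_form xs
      simp [hE, List.modifyHead]
    · simp only [hx, Bool.false_eq_true, if_false]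
      rw [ih]
      obtain ⟨a, t, hE⟩ := splitRec_cons_form xs
      simp [hE, List.modifyHead]

-- ===== B side =====

lemma enumerate_shift {α : Type} (xs : List α) : ∀ s : Int,
    PySem.List.enumerate xs (s + 1) = (PySem.List.enumerate xs s).map (fun p => (p.1 + 1, p.2)) := by
  induction xs with
  | nil => intro s; simp [PySem.List.enumerate_nil]
  | cons x xs ih =>
    intro s
    rw [PySem.List.enumerate_cons, PySem.List.enumerate_cons, List.map_cons]
    have h : s + 1 + 1 = (s + 1) + 1 := by ring
    rw [h, ih (s + 1)]

lemma shifted_markers (E : List (Int × String)) :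
    ((E.map (fun p => (p.1 + 1, p.2))).filter
        (fun p => PySem.Str.startswith p.2 "booster")).map (·.1)
      = ((E.filter (fun p => PySem.Str.startswith p.2 "booster")).map (·.1)).map (· + 1) := by
  rw [List.filter_map, List.map_map, List.map_map]
  rfl

lemma cast_succ_comm (M : List Nat) :
    ((M.map (fun n : Nat => (n : Int))).map (· + 1)) = (M.map (· + 1)).map (fun n : Nat => (n : Int)) := by
  rw [List.map_map, List.map_map]
  apply List.map_congr_left
  intro n _
  simp [Function.comp]

lemma markers_cast (l : List String) :
    ((PySem.List.enumerate l).filter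
        (fun p => PySem.Str.startswith p.2 "booster")).map (·.1)
      = (natMarkers l).map (fun n : Nat => (n : Int)) := by
  induction l with
  | nil => simp [PySem.List.enumerate_nil, natMarkers]
  | cons x xs ih =>
    have hsh : PySem.List.enumerate xs 1 = (PySem.List.enumerate xs).map (fun p => (p.1 + 1, p.2)) := by
      simpa using enumerate_shift xs 0
    rw [show PySem.List.enumerate (x :: xs) = (0, x) :: PySem.List.enumerate xs 1 by
      rw [PySem.List.enumerate_cons]; norm_num]
    rw [hsh, List.filter_cons]
    unfold natMarkers
    by_cases hx : PySem.Str.startswith x "booster"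
    · simp only [hx, if_true, List.map_cons]
      rw [shifted_markers, ih, cast_succ_comm]
      simp
    · simp only [hx, Bool.false_eq_true, if_false]
      rw [shifted_markers, ih, cast_succ_comm]

lemma shift_slices (x : String) (xs : List String) (S E : List Nat) :
    ((S.map (· + 1)).zip (E.map (· + 1))).map
        (fun p : Nat × Nat => ((x :: xs).drop p.1).take (p.2 - p.1))
      = (S.zip E).map (fun p : Nat × Nat => (xs.drop p.1).take (p.2 - p.1)) := by
  rw [List.zip_map, List.map_map]
  apply List.map_congr_left
  intro p _
  simp [Nat.succ_sub_succ, Prod.map]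

lemma sliceOf (l : List String) :
    (((0 :: (natMarkers l).map (· + 1)).zip ((natMarkers l) ++ [l.length])).map
        (fun p : Nat × Nat => (l.drop p.1).take (p.2 - p.1))) = splitRec l := by
  induction l with
  | nil => simp [natMarkers, splitRec]
  | cons x xs ih =>
    unfold natMarkers splitRec
    by_cases hx : PySem.Str.startswith x "booster"
    · simp only [hx, if_true, List.length_cons]
      have h1 : ((0 :: (0 :: (natMarkers xs).map (· + 1)).map (· + 1)).zip
            ((0 :: (natMarkers xs).map (· + 1)) ++ [xs.length + 1]))
          = (0, 0) :: (((0 :: (natMarkers xs).map (· + 1)).map (· + 1)).zip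
              (((natMarkers xs) ++ [xs.length]).map (· + 1))) := by
        simp [List.zip_cons_cons]
      rw [h1, List.map_cons, shift_slices, ih]
      simp
    · simp only [hx, Bool.false_eq_true, if_false, List.length_cons]
      obtain ⟨e0, Et, hE⟩ : ∃ e0 Et, (natMarkers xs) ++ [xs.length] = e0 :: Et := by
        cases h : (natMarkers xs) ++ [xs.length] with
        | nil => exact absurd h (by simp)
        | cons e0 Et => exact ⟨e0, Et, rfl⟩
      have h1 : ((0 :: ((natMarkers xs).map (· + 1)).map (· + 1)).zip
            (((natMarkers xs).map (· + 1)) ++ [xs.length + 1]))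
          = (0, e0 + 1) :: ((((natMarkers xs).map (· + 1)).map (· + 1)).zip (Et.map (· + 1))) := by
        have hmap : ((natMarkers xs).map (· + 1)) ++ [xs.length + 1]
            = ((natMarkers xs) ++ [xs.length]).map (· + 1) := by
          simp
        rw [hmap, hE, List.map_cons, List.zip_cons_cons]
      rw [h1, List.map_cons, shift_slices]
      have h2 : ((0 :: (natMarkers xs).map (· + 1)).zip ((natMarkers xs) ++ [xs.length]))
          = (0, e0) :: (((natMarkers xs).map (· + 1)).zip Et) := by
        rw [hE, List.zip_cons_cons]
      rw [h2, List.map_cons] at ih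
      obtain ⟨a, t, hS⟩ := splitRec_cons_form xs
      rw [hS] at ih ⊢
      injection ih with ihh iht
      simp only [List.modifyHead]
      rw [iht]
      congr 1
      simp only [Nat.sub_zero, List.drop_zero] at ihh ⊢
      rw [List.take_succ_cons, ihh]

lemma B_eq_splitRec (body : List String) :
    (((0 : Int) :: (((PySem.List.enumerate body).filter
          (fun p => PySem.Str.startswith p.2 "booster")).map (·.1)).map (· + 1)).zip
        ((((PySem.List.enumerate body).filter
          (fun p => PySem.Str.startswith p.2 "booster")).map (·.1)) ++ [(body.length : Int)])).map
      (fun p => PySem.List.slice body (some p.1) (some p.2)) = splitRec body := by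
  rw [markers_cast]
  have hS : ((0 : Int) :: ((natMarkers body).map (fun n : Nat => (n : Int))).map (· + 1))
      = ((0 : Nat) :: (natMarkers body).map (· + 1)).map (fun n : Nat => (n : Int)) := by
    rw [cast_succ_comm, List.map_cons]
    norm_num
  have hE : (((natMarkers body).map (fun n : Nat => (n : Int))) ++ [(body.length : Int)])
      = ((natMarkers body) ++ [body.length]).map (fun n : Nat => (n : Int)) := by
    simp
  rw [hS, hE, List.zip_map, List.map_map]
  rw [← sliceOf body]
  apply List.map_congr_left
  intro p _
  simp only [Function.comp, Prod.map]
  rw [PySem.List.slice_natCast]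

-- ===== VERDICT (by name: the statement is the Claim_ definition above) =====
theorem split_trees_py_spec : Claim_equal_split_trees_py := by
  intro tree_lines _
  unfold Spec_split_trees_py split_trees_py split_trees_py_alt
  dsimp only
  rw [A_loop, B_eq_splitRec]
  obtain ⟨a, t, hS⟩ := splitRec_cons_form (PySem.List.slice tree_lines (some 1) none)
  rw [hS]
  simp [List.modifyHead]
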